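-- pv_equiv track=rewrite | github.com/avaines/advent_of_code | 2024/Day 9 Disk Fragmenter/main.py | defrag_step
-- ===== SOURCE A (Python) =====
-- def defrag_step(disk_map):
--     for move_candidate_index in range(len(disk_map)-1,0,-1):
--         if disk_map[move_candidate_index] != ".":
--             for space_index in range(0,len(disk_map)-1):
--                 if disk_map[space_index] == ".":
--                     disk_map[space_index] = disk_map[move_candidate_index]
--                     disk_map[move_candidate_index] = "."
--                     return disk_map
-- ===== SOURCE B (Python) =====
-- def defrag_step(disk_map):
--     n = len(disk_map)
--     first_dot = None
--     last_block = None
--     for i in range(n):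
--         if first_dot is None and i <= n - 2 and disk_map[i] == ".":
--             first_dot = i
--         if i >= 1 and disk_map[i] != ".":
--             last_block = i
--     if first_dot is None or last_block is None:
--         return None
--     disk_map[first_dot] = disk_map[last_block]
--     disk_map[last_block] = "."
--     return disk_map
-- ===== Notes on version B (the rewrite author's own statement) =====
-- stated objective: faster
-- what changed: Replaces A's backward outer scan with a restarted forward inner scan by a single forward pass that tracks the first eligible gap and the last eligible block, swapping once at the end; this removes the repeated inner scan, O(n^2) -> O(n).
-- outside the precondition, e.g. on defrag_step(['.']): A returns None, B returns None; on defrag_step([]): A returns None, B returns None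
import Mathlib
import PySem

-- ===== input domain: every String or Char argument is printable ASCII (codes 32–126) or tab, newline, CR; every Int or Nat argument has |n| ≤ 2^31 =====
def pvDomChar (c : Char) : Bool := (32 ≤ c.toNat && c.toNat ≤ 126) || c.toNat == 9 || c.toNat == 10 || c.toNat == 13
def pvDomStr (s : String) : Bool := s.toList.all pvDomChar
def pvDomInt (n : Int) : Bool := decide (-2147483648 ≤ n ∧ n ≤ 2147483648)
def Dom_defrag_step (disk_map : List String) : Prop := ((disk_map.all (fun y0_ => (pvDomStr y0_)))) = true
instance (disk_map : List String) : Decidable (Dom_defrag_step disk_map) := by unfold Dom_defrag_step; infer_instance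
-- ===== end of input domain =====

-- B replaces A's backward scan with a restarted inner forward scan by one forward pass tracking
-- the first eligible gap and the last eligible block (alternative decomposition, same result).
-- Both Pythons mutate disk_map in place before returning it; the equivalence proved here is about
-- the RETURN value (B performs the same final mutation as A).

-- ===== PORT A =====
-- inner loop: for space_index in range(0, len-1): first '.', do the swap and return
def defragInner (disk : List String) (i : Int) : List Int → Option (List String)
  | [] => none
  | j :: js =>
    if PySem.List.pyGetD disk j "" = "." then
      some (PySem.List.pySetD (PySem.List.pySetD disk j (PySem.List.pyGetD disk i "")) i ".")
    else defragInner disk i js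

-- outer loop: for move_candidate_index in range(len-1, 0, -1)
-- (Python returns None when the loops fall through; those inputs are outside Pre_, here the
--  unmodified list is returned so the function is total)
def defragOuter (disk : List String) : List Int → List String
  | [] => disk
  | i :: is =>
    if PySem.List.pyGetD disk i "" ≠ "." then
      match defragInner disk i (PySem.List.pyRange 0 ((disk.length : Int) - 1) 1) with
      | some r => r
      | none => defragOuter disk is
    else defragOuter disk is

def defrag_step (disk_map : List String) : List String :=
  defragOuter disk_map (PySem.List.pyRange ((disk_map.length : Int) - 1) 0 (-1))

-- ===== PORT B =====
-- one loop step of Source B: update (first_dot, last_block) at index i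
def defragScanStep (disk : List String) (st : Option Int × Option Int) (i : Int) :
    Option Int × Option Int :=
  let fd := if st.1 = none ∧ i ≤ (disk.length : Int) - 2 ∧ PySem.List.pyGetD disk i "" = "."
            then some i else st.1
  let lb := if 1 ≤ i ∧ PySem.List.pyGetD disk i "" ≠ "." then some i else st.2
  (fd, lb)

-- (as in A's port, the list is returned unchanged where Source B returns None; outside Pre_)
def defrag_step_alt (disk_map : List String) : List String :=
  match (PySem.List.pyRange 0 (disk_map.length : Int) 1).foldl (defragScanStep disk_map)
        (none, none) with
  | (some j, some i) =>
      PySem.List.pySetD (PySem.List.pySetD disk_map j (PySem.List.pyGetD disk_map i "")) i "."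
  | _ => disk_map

-- ===== PRECONDITION & SPEC =====
-- Pre_ excludes exactly the inputs on which A falls through both loops and returns None (which is
-- not a List String): lists with no '.' before the last position or no non-'.' after position 0.
def Pre_defrag_step (disk_map : List String) : Prop :=
  ((disk_map.take (disk_map.length - 1)).any (fun s => decide (s = "."))) = true ∧
  ((disk_map.drop 1).any (fun s => decide (s ≠ "."))) = true
instance (disk_map : List String) : Decidable (Pre_defrag_step disk_map) := by
  unfold Pre_defrag_step; infer_instance

def pvWitness_defrag_step : List String := [".", "1"]

def Spec_defrag_step (disk_map : List String) (out : List String) : Prop :=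
  out = defrag_step_alt disk_map
instance (disk_map : List String) (out : List String) : Decidable (Spec_defrag_step disk_map out) := by
  unfold Spec_defrag_step; infer_instance

-- ===== CLAIM (what is proved, stated in full; the proofs are below) =====
def Claim_equal_defrag_step : Prop := ∀ (disk_map : List String), Dom_defrag_step disk_map → Pre_defrag_step disk_map → Spec_defrag_step disk_map (defrag_step disk_map)

-- ===== LEMMAS AND PROOFS =====

-- common characterization: the index of the first '.' in positions [0, n-2]
def pvFd (disk : List String) : Option Int :=
  (PySem.List.pyRange 0 ((disk.length : Int) - 1) 1).find?
    (fun j => decide (PySem.List.pyGetD disk j "" = "."))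

-- the index of the last non-'.' in positions [1, n-1]
def pvLb (disk : List String) : Option Int :=
  (PySem.List.pyRange 1 (disk.length : Int) 1).reverse.find?
    (fun i => decide (PySem.List.pyGetD disk i "" ≠ "."))

def pvRes (disk : List String) : List String :=
  match pvFd disk, pvLb disk with
  | some j, some i =>
      PySem.List.pySetD (PySem.List.pySetD disk j (PySem.List.pyGetD disk i "")) i "."
  | _, _ => disk

theorem find?_congr_mem {α : Type} (l : List α) (p q : α → Bool)
    (h : ∀ a ∈ l, p a = q a) : l.find? p = l.find? q := by
  induction l with
  | nil => rfl
  | cons x xs ih =>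
    have hx := h x (by simp)
    by_cases hp : p x = true
    · rw [List.find?_cons_of_pos hp, List.find?_cons_of_pos (hx ▸ hp)]
    · rw [List.find?_cons_of_neg hp,
        List.find?_cons_of_neg (by rw [← hx]; exact hp)]
      exact ih (fun a ha => h a (by simp [ha]))

theorem defragInner_eq (disk : List String) (i : Int) (js : List Int) :
    defragInner disk i js =
      (js.find? (fun j => decide (PySem.List.pyGetD disk j "" = "."))).map
        (fun j => PySem.List.pySetD (PySem.List.pySetD disk j (PySem.List.pyGetD disk i "")) i ".") := by
  induction js with
  | nil => rfl
  | cons j js ih =>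
    by_cases h : PySem.List.pyGetD disk j "" = "."
    · simp [defragInner, h, List.find?_cons_of_pos]
    · rw [List.find?_cons_of_neg (by simpa using h)]
      simpa [defragInner, h] using ih

theorem defragOuter_none (disk : List String) (h : pvFd disk = none) (is : List Int) :
    defragOuter disk is = disk := by
  induction is with
  | nil => rfl
  | cons i is ih =>
    simp only [defragOuter, defragInner_eq, pvFd] at *
    rw [h]
    simp [ih]

theorem defragOuter_some (disk : List String) (j : Int) (h : pvFd disk = some j) (is : List Int) :
    defragOuter disk is =
      match is.find? (fun i => decide (PySem.List.pyGetD disk i "" ≠ ".")) with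
      | some i => PySem.List.pySetD (PySem.List.pySetD disk j (PySem.List.pyGetD disk i "")) i "."
      | none => disk := by
  induction is with
  | nil => rfl
  | cons i is ih =>
    by_cases hi : PySem.List.pyGetD disk i "" ≠ "."
    · rw [List.find?_cons_of_pos (by simpa using hi)]
      simp only [defragOuter, defragInner_eq, pvFd] at *
      rw [h]
      simp [hi]
    · rw [List.find?_cons_of_neg (by simpa using hi)]
      simp only [defragOuter] at *
      simp [hi, ih]

theorem A_eq_pvRes (disk : List String) : defrag_step disk = pvRes disk := by
  have hr : PySem.List.pyRange ((disk.length : Int) - 1) 0 (-1)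
      = (PySem.List.pyRange 1 (disk.length : Int) 1).reverse := by
    rw [PySem.List.pyRange_neg_one_eq_reverse]
    norm_num
  unfold defrag_step pvRes
  rw [hr]
  cases hfd : pvFd disk with
  | none => rw [defragOuter_none disk hfd]
  | some j =>
    rw [defragOuter_some disk j hfd]
    unfold pvLb
    cases (PySem.List.pyRange 1 (disk.length : Int) 1).reverse.find?
        (fun i => decide (PySem.List.pyGetD disk i "" ≠ ".")) with
    | none => rfl
    | some i => rfl

theorem defrag_fold (disk : List String) (xs : List Int) (f0 l0 : Option Int) :
    xs.foldl (defragScanStep disk) (f0, l0) =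
      (f0.or (xs.find? (fun i => decide (i ≤ (disk.length : Int) - 2 ∧ PySem.List.pyGetD disk i "" = "."))),
       (xs.reverse.find? (fun i => decide (1 ≤ i ∧ PySem.List.pyGetD disk i "" ≠ "."))).or l0) := by
  induction xs generalizing f0 l0 with
  | nil => cases f0 <;> simp
  | cons x xs ih =>
    rw [List.foldl_cons, ih]
    simp only [Prod.mk.injEq]
    refine ⟨?_, ?_⟩
    ·
      by_cases hx : x ≤ (disk.length : Int) - 2 ∧ PySem.List.pyGetD disk x "" = "."
      · rw [List.find?_cons_of_pos (by simpa using hx)]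
        cases f0 <;> simp [defragScanStep, hx]
      · rw [List.find?_cons_of_neg (by simpa using hx)]
        cases f0 <;> simp [defragScanStep, hx]
    · have happ : (x :: xs).reverse = xs.reverse ++ [x] := by simp
      rw [happ, List.find?_append, Option.or_assoc]
      by_cases hx : 1 ≤ x ∧ PySem.List.pyGetD disk x "" ≠ "."
      · simp [defragScanStep, hx]
      · simp [defragScanStep, hx]

theorem fd_translate (disk : List String) :
    (PySem.List.pyRange 0 (disk.length : Int) 1).find?
        (fun i => decide (i ≤ (disk.length : Int) - 2 ∧ PySem.List.pyGetD disk i "" = "."))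
      = pvFd disk := by
  unfold pvFd
  rcases Nat.eq_zero_or_pos disk.length with h0 | hpos
  · rw [PySem.List.pyRange_one_eq_nil (by omega), PySem.List.pyRange_one_eq_nil (by omega)]
    simp
  · have h1 : (1 : Int) ≤ (disk.length : Int) := by exact_mod_cast hpos
    have hsplit : PySem.List.pyRange 0 (disk.length : Int) 1
        = PySem.List.pyRange 0 ((disk.length : Int) - 1) 1 ++ [(disk.length : Int) - 1] := by
      have := PySem.List.pyRange_one_succ_right (a := 0) (b := (disk.length : Int) - 1) (by omega)
      rw [show ((disk.length : Int) - 1) + 1 = (disk.length : Int) by ring] at this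
      simpa using this
    rw [hsplit, List.find?_append]
    rw [find?_congr_mem _ _ (fun j => decide (PySem.List.pyGetD disk j "" = "."))
      (by
        intro a ha
        have := (PySem.List.mem_pyRange_one.mp ha).2
        simp only [decide_eq_decide]
        constructor
        · exact fun h => h.2
        · exact fun h => ⟨by omega, h⟩)]
    have hlast : ([(disk.length : Int) - 1].find?
        (fun i => decide (i ≤ (disk.length : Int) - 2 ∧ PySem.List.pyGetD disk i "" = "."))) = none := by
      simp only [List.find?_singleton]
      rw [if_neg (by simp; omega)]
    rw [hlast, Option.or_none]

theorem lb_translate (disk : List String) :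
    (PySem.List.pyRange 0 (disk.length : Int) 1).reverse.find?
        (fun i => decide (1 ≤ i ∧ PySem.List.pyGetD disk i "" ≠ "."))
      = pvLb disk := by
  unfold pvLb
  rcases Nat.eq_zero_or_pos disk.length with h0 | hpos
  · rw [PySem.List.pyRange_one_eq_nil (by omega), PySem.List.pyRange_one_eq_nil (by omega)]
    simp
  · have h1 : (0 : Int) < (disk.length : Int) := by exact_mod_cast hpos
    rw [PySem.List.pyRange_one_cons h1, show (0:Int)+1 = 1 from by norm_num]
    have happ : ((0 : Int) :: PySem.List.pyRange 1 (disk.length : Int) 1).reverse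
        = (PySem.List.pyRange 1 (disk.length : Int) 1).reverse ++ [(0 : Int)] := by simp
    rw [happ, List.find?_append]
    rw [find?_congr_mem _ _ (fun i => decide (PySem.List.pyGetD disk i "" ≠ "."))
      (by
        intro a ha
        rw [List.mem_reverse] at ha
        have := (PySem.List.mem_pyRange_one.mp ha).1
        simp only [decide_eq_decide]
        constructor
        · exact fun h => h.2
        · exact fun h => ⟨this, h⟩)]
    have hlast : ([(0 : Int)].find?
        (fun i => decide (1 ≤ i ∧ PySem.List.pyGetD disk i "" ≠ "."))) = none := by
      simp
    rw [hlast, Option.or_none]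

theorem B_eq_pvRes (disk : List String) : defrag_step_alt disk = pvRes disk := by
  unfold defrag_step_alt pvRes
  rw [defrag_fold disk _ none none, fd_translate, lb_translate]
  simp only [Option.none_or, Option.or_none]
  cases pvFd disk <;> cases pvLb disk <;> rfl

-- ===== VERDICT (by name: the statement is the Claim_ definition above) =====
theorem defrag_step_spec : Claim_equal_defrag_step := by
  intro disk _ _
  unfold Spec_defrag_step
  rw [A_eq_pvRes, B_eq_pvRes]
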